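-- pv_equiv track=rewrite | github.com/ArthurVerrez/project-euler | PE69.py | era
-- ===== SOURCE A (Python) =====
-- def era(n):
--     p=n*[True]
--     p[0]=False
--     p[1]=False
--     l=[]
--     for k in range(n):
--         l.append([])
--
--     for i in range(2,n):
--         if p[i]:
--             for j in range(i,n,i):
--                 l[j].append(i)
--                 p[j]=False
--     return l
-- ===== SOURCE B (Python) =====
-- def era(n):
--     spf = n * [0]
--     spf[0] = 1
--     spf[1] = 1
--     for i in range(2, n):
--         if spf[i] == 0:
--             for j in range(i, n, i):
--                 if spf[j] == 0:
--                     spf[j] = i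
--     res = []
--     for m in range(n):
--         fs = []
--         x = m
--         while x > 1:
--             p = spf[x]
--             fs.append(p)
--             while x % p == 0:
--                 x //= p
--         res.append(fs)
--     return res
-- ===== Notes on version B (the rewrite author's own statement) =====
-- stated objective: alternative
-- what changed: A appends each sieve prime to a per-number factor list while crossing out its multiples; B instead sieves a smallest-prime-factor table and then reconstructs each number's distinct prime factors by repeated division by spf[x].
import Mathlib
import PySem

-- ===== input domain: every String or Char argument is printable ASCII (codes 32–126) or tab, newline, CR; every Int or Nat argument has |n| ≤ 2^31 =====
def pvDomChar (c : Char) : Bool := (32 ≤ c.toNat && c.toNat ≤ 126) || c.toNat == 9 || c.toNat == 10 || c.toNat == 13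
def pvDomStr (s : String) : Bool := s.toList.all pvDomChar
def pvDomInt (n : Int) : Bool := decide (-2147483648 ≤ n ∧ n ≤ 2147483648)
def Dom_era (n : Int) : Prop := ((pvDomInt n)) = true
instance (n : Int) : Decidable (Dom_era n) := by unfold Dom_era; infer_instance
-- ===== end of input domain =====

-- B replaces A's sieve-time appending of each prime to every multiple's factor list by a
-- smallest-prime-factor table plus per-number factor reconstruction (alternative algorithm,
-- same results; equivalence proved on n ≥ 2, where the Pythons return).

-- ===== PORT A =====
def era (n : Int) : List (List Int) :=
  -- p = n*[True]; p[0]=False; p[1]=False  (in-range for n ≥ 2; Python raises IndexError otherwise — excluded by Pre_era)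
  let p0 := ((List.replicate n.toNat true).set 0 false).set 1 false
  -- l=[]; for k in range(n): l.append([])
  let l0 := (PySem.List.pyRange 0 n 1).foldl (fun l _ => l ++ [([] : List Int)]) []
  -- for i in range(2,n): if p[i]: for j in range(i,n,i): l[j].append(i); p[j]=False
  let st := (PySem.List.pyRange 2 n 1).foldl
    (fun (st : List (List Int) × List Bool) i =>
      if st.2.getD i.toNat false then
        (PySem.List.pyRange i n i).foldl
          (fun st2 j => (st2.1.modify j.toNat (· ++ [i]), st2.2.set j.toNat false)) st
      else st)
    (l0, p0)
  st.1

-- ===== PORT B =====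
-- inner `while x % p == 0: x //= p`; fuel makes the loop total, x.toNat steps always suffice here
def divOutF : Nat → Int → Int → Int
  | 0, x, _ => x
  | f+1, x, p => if PySem.Int.mod x p = 0 then divOutF f (PySem.Int.floordiv x p) p else x

-- `while x > 1: p = spf[x]; fs.append(p); while x % p == 0: x //= p`; fuel x.toNat suffices
def pfLoop : Nat → List Int → Int → List Int → List Int
  | 0, _, _, acc => acc
  | f+1, spf, x, acc =>
    if 1 < x then
      let p := spf.getD x.toNat 0
      pfLoop f spf (divOutF x.toNat x p) (acc ++ [p])
    else acc

def era_alt (n : Int) : List (List Int) :=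
  -- spf = n*[0]; spf[0]=1; spf[1]=1  (in-range for n ≥ 2; Python raises IndexError otherwise — excluded by Pre_era)
  let spf0 := ((List.replicate n.toNat (0 : Int)).set 0 1).set 1 1
  -- for i in range(2,n): if spf[i]==0: for j in range(i,n,i): if spf[j]==0: spf[j]=i
  let spf := (PySem.List.pyRange 2 n 1).foldl
    (fun s i =>
      if s.getD i.toNat 0 = 0 then
        (PySem.List.pyRange i n i).foldl
          (fun s2 j => if s2.getD j.toNat 0 = 0 then s2.set j.toNat i else s2) s
      else s)
    spf0
  -- res=[]; for m in range(n): … res.append(fs)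
  (PySem.List.pyRange 0 n 1).foldl (fun res m => res ++ [pfLoop m.toNat spf m []]) []

-- ===== PRECONDITION & SPEC =====
-- Pre_era excludes exactly n < 2, where both Pythons raise IndexError on the p[0]/p[1] (spf[0]/spf[1]) writes.
def Pre_era (n : Int) : Prop := 2 ≤ n
instance (n : Int) : Decidable (Pre_era n) := by unfold Pre_era; infer_instance
def pvWitness_era : Int := (5)

def Spec_era (n : Int) (out : List (List Int)) : Prop := out = era_alt n
instance (n : Int) (out : List (List Int)) : Decidable (Spec_era n out) := by unfold Spec_era; infer_instance

-- ===== CLAIM (what is proved, stated in full; the proofs are below) =====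
def Claim_equal_era : Prop := ∀ (n : Int), Dom_era n → Pre_era n → Spec_era n (era n)

-- ===== LEMMAS AND PROOFS =====


def dOut (x p : Nat) : Nat :=
  if _h : 2 ≤ p ∧ p ∣ x ∧ 1 ≤ x then dOut (x / p) p else x
termination_by x
decreasing_by exact Nat.div_lt_self (by omega) (by omega)

theorem dOut_eq (x p : Nat) :
    dOut x p = if 2 ≤ p ∧ p ∣ x ∧ 1 ≤ x then dOut (x / p) p else x := by
  rw [dOut]; split_ifs <;> simp_all

theorem dOut_dvd (x p : Nat) : dOut x p ∣ x := by
  fun_induction dOut with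
  | case1 x h ih => exact ih.trans (Nat.div_dvd_of_dvd h.2.1)
  | case2 x h => exact dvd_refl x

theorem dOut_pos (x p : Nat) (hx : 1 ≤ x) : 1 ≤ dOut x p := by
  fun_induction dOut with
  | case1 x h ih => exact ih ((Nat.one_le_div_iff (by omega)).2 (Nat.le_of_dvd h.2.2 h.2.1))
  | case2 x h => exact hx

theorem dOut_not_dvd (x p : Nat) (hp : 2 ≤ p) (hx : 1 ≤ x) : ¬ p ∣ dOut x p := by
  fun_induction dOut with
  | case1 x h ih => exact ih ((Nat.one_le_div_iff (by omega)).2 (Nat.le_of_dvd h.2.2 h.2.1))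
  | case2 x h => intro hd; exact h ⟨hp, hd, hx⟩

theorem dOut_lt (x p : Nat) (hp : 2 ≤ p) (hd : p ∣ x) (hx : 1 ≤ x) : dOut x p < x := by
  rw [dOut_eq, if_pos (show 2 ≤ p ∧ p ∣ x ∧ 1 ≤ x from ⟨hp, hd, hx⟩)]
  calc dOut (x / p) p ≤ x / p :=
        Nat.le_of_dvd ((Nat.one_le_div_iff (by omega)).2 (Nat.le_of_dvd hx hd)) (dOut_dvd _ _)
    _ < x := Nat.div_lt_self (by omega) (by omega)

theorem dOut_prime_dvd (x p q : Nat) (hp : q.Prime → p.Prime) (hq : q.Prime) (hne : q ≠ p)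
    (h : q ∣ x) : q ∣ dOut x p := by
  fun_induction dOut with
  | case1 x h2 ih =>
    refine ih ?_
    rcases (Nat.Prime.dvd_mul hq).1
        (show q ∣ p * (x / p) by rw [Nat.mul_div_cancel' h2.2.1]; exact h) with h3 | h3
    · exact absurd ((Nat.prime_dvd_prime_iff_eq hq (hp hq)).1 h3) hne
    · exact h3
  | case2 x h2 => exact h

theorem divOutF_eq (p : Nat) (hp : 2 ≤ p) :
    ∀ (x : Nat), 1 ≤ x → ∀ f, x ≤ f → divOutF f (↑x) (↑p) = ↑(dOut x p) := by
  intro x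
  induction x using Nat.strong_induction_on with
  | _ x ih =>
    intro hx f hf
    obtain ⟨g, rfl⟩ : ∃ g, f = g + 1 := ⟨f - 1, by omega⟩
    rw [divOutF]
    have hmod : PySem.Int.mod (↑x) (↑p) = ↑(x % p) := by
      rw [PySem.Int.mod_eq_emod_of_pos (by omega)]; exact (Int.natCast_mod x p).symm
    by_cases hd : p ∣ x
    · have hx1 : x / p < x := Nat.div_lt_self (by omega) (by omega)
      have hdiv : PySem.Int.floordiv (↑x) (↑p) = ↑(x / p) := by
        rw [PySem.Int.floordiv_eq_ediv_of_pos (by omega)]; exact (Int.natCast_div x p).symm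
      have hmz : x % p = 0 := Nat.mod_eq_zero_of_dvd hd
      rw [if_pos (by rw [hmod, hmz]; rfl), hdiv,
        ih (x / p) hx1 ((Nat.one_le_div_iff (by omega)).2 (Nat.le_of_dvd hx hd)) g (by omega),
        dOut_eq x p, if_pos ⟨hp, hd, hx⟩]
    · rw [if_neg (by rw [hmod]; exact_mod_cast fun h => hd (Nat.dvd_of_mod_eq_zero (by exact_mod_cast h))),
        dOut_eq, if_neg (by tauto)]

-- fold of a pairwise-independent pointwise update, computed index by index
theorem foldl_pointwise {α : Type} (step : List α → Int → List α) (u : Nat → α → α) :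
    ∀ (js : List Int), js.Nodup →
      (∀ (xs : List α) (j : Int), j ∈ js → ∀ (m : Nat),
        (step xs j)[m]? = if (m : Int) = j then xs[m]?.map (u m) else xs[m]?) →
      ∀ (xs : List α) (m : Nat),
        (js.foldl step xs)[m]? = if (m : Int) ∈ js then xs[m]?.map (u m) else xs[m]? := by
  intro js
  induction js with
  | nil => intro _ _ xs m; simp
  | cons j t ih =>
    intro hnd hstep xs m
    simp only [List.foldl_cons]
    rw [ih (List.nodup_cons.mp hnd).2 (fun xs j hj m => hstep xs j (List.mem_cons_of_mem _ hj) m),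
      hstep xs j (List.mem_cons_self)]
    rcases List.nodup_cons.mp hnd with ⟨hjt, -⟩
    by_cases hmem : (m : Int) ∈ t
    · have hj : ¬ ((m : Int) = j) := fun hj => hjt (hj ▸ hmem)
      simp [hmem, hj]
    · by_cases hj : (m : Int) = j <;> simp [hmem, hj, hjt]

theorem foldl_pair {α β γ : Type} (f : α → γ → α) (g : β → γ → β) (js : List γ) (a : α) (b : β) :
    js.foldl (fun st j => (f st.1 j, g st.2 j)) (a, b) = (js.foldl f a, js.foldl g b) := by
  induction js generalizing a b with
  | nil => rfl
  | cons j t ih => simp only [List.foldl_cons]; exact ih (f a j) (g b j)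

theorem foldl_append_singleton {α β : Type} (f : β → α) (js : List β) :
    ∀ (init : List α), js.foldl (fun r m => r ++ [f m]) init = init ++ js.map f := by
  induction js with
  | nil => intro init; simp
  | cons j t ih => intro init; simp only [List.foldl_cons, List.map_cons]; rw [ih]; simp

theorem mem_pyRange_mul (k N m : Nat) (hk : 1 ≤ k) :
    ((m : Int) ∈ PySem.List.pyRange (↑k) (↑N) (↑k)) ↔ (k ∣ m ∧ k ≤ m ∧ m < N) := by
  rw [PySem.List.mem_pyRange_iff_of_pos (by exact_mod_cast hk)]
  constructor
  · rintro ⟨h1, h2, h3⟩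
    have hd : (k : Int) ∣ (m : Int) := by
      have := dvd_add h3 (dvd_refl (k : Int)); simpa using this
    exact ⟨by exact_mod_cast hd, by exact_mod_cast h1, by exact_mod_cast h2⟩
  · rintro ⟨h1, h2, h3⟩
    refine ⟨by exact_mod_cast h2, by exact_mod_cast h3, ?_⟩
    exact dvd_sub (by exact_mod_cast h1) (dvd_refl _)

theorem nodup_pyRange_mul (k N : Nat) (hk : 1 ≤ k) :
    (PySem.List.pyRange (↑k) (↑N) (↑k)).Nodup := by
  rw [PySem.List.pyRange_of_pos (a := (k:Int)) (b := (N:Int)) (by exact_mod_cast hk)]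
  refine List.Nodup.map ?_ (List.nodup_range)
  intro a b hab
  simp only at hab
  have h1 : (k : Int) * a = k * b := by omega
  have h2 : (a : Int) = b := mul_left_cancel₀ (show (k:Int) ≠ 0 by exact_mod_cast (by omega : k ≠ 0)) h1
  exact_mod_cast h2

-- cpf facts
def cpf (x : Nat) : List Nat := (List.range (x + 1)).filter (fun q => Nat.Prime q ∧ q ∣ x)

theorem mem_cpf (x q : Nat) (hx : 1 ≤ x) : q ∈ cpf x ↔ Nat.Prime q ∧ q ∣ x := by
  simp only [cpf, List.mem_filter, List.mem_range, decide_eq_true_eq]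
  constructor
  · tauto
  · rintro ⟨h1, h2⟩; exact ⟨by have := Nat.le_of_dvd hx h2; omega, h1, h2⟩

theorem cpf_pairwise (x : Nat) : (cpf x).Pairwise (· < ·) :=
  List.Pairwise.sublist (List.filter_sublist) List.pairwise_lt_range

theorem cpf_zero : cpf 0 = [] := by decide
theorem cpf_one : cpf 1 = [] := by decide

theorem sorted_eq_of_mem_iff {l₁ l₂ : List Nat} (h₁ : l₁.Pairwise (· < ·))
    (h₂ : l₂.Pairwise (· < ·)) (h : ∀ q, q ∈ l₁ ↔ q ∈ l₂) : l₁ = l₂ :=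
  List.Pairwise.eq_of_mem_iff h₁ h₂ h

theorem cpf_cons (x : Nat) (hx : 2 ≤ x) :
    cpf x = x.minFac :: cpf (dOut x x.minFac) := by
  have hxne : x ≠ 1 := by omega
  have hpf : x.minFac.Prime := Nat.minFac_prime hxne
  have hp2 : 2 ≤ x.minFac := hpf.two_le
  have hx1 : 1 ≤ x := by omega
  have hd1 : 1 ≤ dOut x x.minFac := dOut_pos _ _ hx1
  refine sorted_eq_of_mem_iff (cpf_pairwise x) ?_ ?_
  · refine List.Pairwise.cons ?_ (cpf_pairwise _)
    intro q hq
    rw [mem_cpf _ _ hd1] at hq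
    have hqx : q ∣ x := hq.2.trans (dOut_dvd _ _)
    have hle : x.minFac ≤ q := Nat.minFac_le_of_dvd hq.1.two_le hqx
    have hne : q ≠ x.minFac := by
      intro hh; exact dOut_not_dvd x x.minFac hp2 hx1 (hh ▸ hq.2)
    omega
  · intro q
    rw [mem_cpf _ _ hx1, List.mem_cons, mem_cpf _ _ hd1]
    constructor
    · rintro ⟨hq, hqx⟩
      by_cases hne : q = x.minFac
      · exact Or.inl hne
      · exact Or.inr ⟨hq, dOut_prime_dvd x x.minFac q (fun _ => hpf) hq hne hqx⟩
    · rintro (rfl | ⟨hq, hqx⟩)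
      · exact ⟨hpf, Nat.minFac_dvd x⟩
      · exact ⟨hq, hqx.trans (dOut_dvd _ _)⟩

theorem pfLoop_spec (N : Nat) (spf : List Int)
    (hspf : ∀ x : Nat, 2 ≤ x → x < N → spf.getD x 0 = (x.minFac : Int)) :
    ∀ x : Nat, x < N → ∀ f, x ≤ f → ∀ acc,
      pfLoop f spf (↑x) acc = acc ++ (cpf x).map (fun q => (q : Int)) := by
  intro x
  induction x using Nat.strong_induction_on with
  | _ x ih =>
    intro hxN f hf acc
    by_cases hx2 : 2 ≤ x
    · obtain ⟨g, rfl⟩ : ∃ g, f = g + 1 := ⟨f - 1, by omega⟩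
      rw [pfLoop]
      rw [if_pos (by exact_mod_cast (by omega : 1 < x))]
      show pfLoop g spf (divOutF ((x : Int)).toNat (↑x) (spf.getD ((x : Int)).toNat 0))
          (acc ++ [spf.getD ((x : Int)).toNat 0]) = acc ++ (cpf x).map (fun q => (q : Int))
      have htn : ((x : Int)).toNat = x := by simp
      rw [htn, hspf x hx2 hxN]
      have hxne : x ≠ 1 := by omega
      have hpf := Nat.minFac_prime hxne
      have hp2 : 2 ≤ x.minFac := hpf.two_le
      rw [divOutF_eq x.minFac hp2 x (by omega) x (le_refl x)]
      set x' := dOut x x.minFac with hx'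
      have hlt : x' < x := dOut_lt x x.minFac hp2 (Nat.minFac_dvd x) (by omega)
      rw [ih x' hlt (by omega) g (by omega) (acc ++ [(x.minFac : Int)])]
      rw [cpf_cons x hx2]
      simp
      rfl
    · have hc : cpf x = [] := by
        interval_cases x
        · exact cpf_zero
        · exact cpf_one
      rcases f with - | g
      · rw [pfLoop, hc]; simp
      · rw [pfLoop, if_neg (by exact_mod_cast (by omega : ¬ 1 < x)), hc]; simp

def La (k m : Nat) : List Int :=
  ((List.range k).filter (fun q => Nat.Prime q ∧ q ∣ m ∧ 1 ≤ m)).map (fun q => (q : Int))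

def Pb (k m : Nat) : Bool := decide (2 ≤ m ∧ ∀ q ∈ List.range k, ¬(Nat.Prime q ∧ q ∣ m))

def spfVal (k m : Nat) : Int :=
  if m < 2 then 1 else if m.minFac < k then (m.minFac : Int) else 0

theorem getElem?_map_range {α : Type} (f : Nat → α) (N m : Nat) :
    ((List.range N).map f)[m]? = if m < N then some (f m) else none := by
  rw [List.getElem?_map]
  by_cases h : m < N
  · rw [List.getElem?_range h]; simp [h]
  · rw [List.getElem?_eq_none (by simpa using Nat.le_of_not_lt h)]; simp [h]

theorem getD_map_range {α : Type} (f : Nat → α) (N m : Nat) (hm : m < N) (d : α) :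
    ((List.range N).map f).getD m d = f m := by
  rw [List.getD_eq_getElem?_getD, getElem?_map_range, if_pos hm]; rfl

theorem Pb_self (k : Nat) (hk : 2 ≤ k) : Pb k k = true ↔ k.Prime := by
  simp only [Pb, decide_eq_true_eq]
  constructor
  · rintro ⟨-, hall⟩
    by_contra hnp
    have hne1 : k ≠ 1 := by omega
    have hpf := Nat.minFac_prime hne1
    have hlt : k.minFac < k := by
      have hle : k.minFac ≤ k := Nat.minFac_le (by omega)
      have : k.minFac ≠ k := fun h => hnp (Nat.prime_def_minFac.mpr ⟨hk, h⟩)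
      omega
    exact hall k.minFac (List.mem_range.mpr hlt) ⟨hpf, Nat.minFac_dvd k⟩
  · intro hp
    refine ⟨hk, fun q hq ⟨hqp, hqd⟩ => ?_⟩
    rcases (Nat.Prime.eq_one_or_self_of_dvd hp q hqd) with h | h
    · exact Nat.Prime.one_lt hqp |>.ne' h
    · exact absurd h (by have := List.mem_range.mp hq; omega)

theorem Pb_two (m : Nat) : Pb 2 m = decide (2 ≤ m) := by
  simp only [Pb, show List.range 2 = [0, 1] from rfl]
  simp [Nat.not_prime_zero, Nat.not_prime_one]

theorem La_two (m : Nat) : La 2 m = [] := by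
  simp only [La, show List.range 2 = [0, 1] from rfl]
  simp [Nat.not_prime_zero, Nat.not_prime_one]

theorem La_succ (k m : Nat) (hp : k.Prime) :
    La (k+1) m = if k ∣ m ∧ 1 ≤ m then La k m ++ [(k : Int)] else La k m := by
  simp only [La, List.range_succ, List.filter_append]
  by_cases h : k ∣ m ∧ 1 ≤ m
  · rw [if_pos h]
    simp [hp, h.1, h.2]
  · rw [if_neg h]
    have : ¬ (Nat.Prime k ∧ k ∣ m ∧ 1 ≤ m) := by tauto
    simp only [List.filter_cons, List.filter_nil]
    rw [if_neg (by simpa using this)]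
    simp

theorem La_succ_not (k m : Nat) (hp : ¬ k.Prime) : La (k+1) m = La k m := by
  simp only [La, List.range_succ, List.filter_append, List.filter_cons, List.filter_nil]
  rw [if_neg (by simp [hp])]
  simp

theorem Pb_succ (k m : Nat) (hk : 2 ≤ k) (hp : k.Prime) :
    Pb (k+1) m = if k ∣ m ∧ 1 ≤ m then false else Pb k m := by
  by_cases h : k ∣ m ∧ 1 ≤ m
  · rw [if_pos h]
    have hm : 2 ≤ m := le_trans hk (Nat.le_of_dvd h.2 h.1)
    simp only [Pb, decide_eq_false_iff_not]
    rintro ⟨-, hall⟩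
    exact hall k (List.mem_range.mpr (by omega)) ⟨hp, h.1⟩
  · rw [if_neg h]
    simp only [Pb, decide_eq_decide]
    constructor
    · rintro ⟨hm, hall⟩
      exact ⟨hm, fun q hq hq2 => hall q (List.mem_range.mpr (by have := List.mem_range.mp hq; omega)) hq2⟩
    · rintro ⟨hm, hall⟩
      refine ⟨hm, fun q hq hq2 => ?_⟩
      have hqlt := List.mem_range.mp hq
      by_cases hqk : q = k
      · subst hqk; exact h ⟨hq2.2, by omega⟩
      · exact hall q (List.mem_range.mpr (by omega)) hq2

theorem Pb_succ_not (k m : Nat) (hp : ¬ k.Prime) : Pb (k+1) m = Pb k m := by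
  simp only [Pb, decide_eq_decide]
  constructor
  · rintro ⟨hm, hall⟩
    exact ⟨hm, fun q hq hq2 => hall q (List.mem_range.mpr (by have := List.mem_range.mp hq; omega)) hq2⟩
  · rintro ⟨hm, hall⟩
    refine ⟨hm, fun q hq hq2 => ?_⟩
    have hqlt := List.mem_range.mp hq
    by_cases hqk : q = k
    · exact absurd (hqk ▸ hq2.1) hp
    · exact hall q (List.mem_range.mpr (by omega)) hq2

theorem spfVal_two (m : Nat) : spfVal 2 m = if m < 2 then 1 else 0 := by
  simp only [spfVal]
  by_cases h : m < 2
  · simp [h]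
  · rw [if_neg h, if_neg h, if_neg ?_]
    have := (Nat.minFac_prime (show m ≠ 1 by omega)).two_le
    omega

theorem spfVal_self (k : Nat) (hk : 2 ≤ k) : spfVal k k = 0 ↔ k.Prime := by
  have hne1 : k ≠ 1 := by omega
  have h2 := (Nat.minFac_prime hne1).two_le
  have hle : k.minFac ≤ k := Nat.minFac_le (by omega)
  simp only [spfVal, if_neg (show ¬ k < 2 by omega)]
  constructor
  · intro hc
    by_cases h : k.minFac < k
    · rw [if_pos h] at hc
      exact absurd (by exact_mod_cast hc : k.minFac = 0) (by omega)
    · exact Nat.prime_def_minFac.mpr ⟨hk, by omega⟩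
  · intro hp
    have heq := (Nat.prime_def_minFac.mp hp).2
    rw [if_neg (by omega)]

-- hstep instance for A's l-component (modify) on the members of pyRange k n k
theorem hstep_modify (v : Int) (xs : List (List Int)) (j : Int) (hj : 0 ≤ j) (m : Nat) :
    (xs.modify j.toNat (· ++ [v]))[m]? =
      if (m : Int) = j then xs[m]?.map (· ++ [v]) else xs[m]? := by
  rw [List.getElem?_modify]
  by_cases h : (m : Int) = j
  · rw [if_pos h]
    have : j.toNat = m := by omega
    simp [this]
  · rw [if_neg h]
    have : j.toNat ≠ m := by omega
    simp [this]

theorem hstep_set (xs : List Bool) (j : Int) (hj : 0 ≤ j) (m : Nat) :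
    (xs.set j.toNat false)[m]? =
      if (m : Int) = j then xs[m]?.map (fun _ => false) else xs[m]? := by
  rw [List.getElem?_set]
  by_cases h : (m : Int) = j
  · rw [if_pos h, if_pos (by omega : j.toNat = m)]
    by_cases hl : j.toNat < xs.length
    · rw [if_pos hl]
      have : m < xs.length := by omega
      rw [List.getElem?_eq_getElem this]; rfl
    · rw [if_neg hl, List.getElem?_eq_none (by omega)]; rfl
  · rw [if_neg (by omega : ¬ j.toNat = m), if_neg h]

theorem hstep_spf (v : Int) (xs : List Int) (j : Int) (hj : 0 ≤ j) (m : Nat) :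
    (if xs.getD j.toNat 0 = 0 then xs.set j.toNat v else xs)[m]? =
      if (m : Int) = j then xs[m]?.map (fun w => if w = 0 then v else w) else xs[m]? := by
  by_cases h : (m : Int) = j
  · rw [if_pos h]
    have hm : j.toNat = m := by omega
    rw [hm] at *
    by_cases hl : m < xs.length
    · have hsome : xs[m]? = some xs[m] := List.getElem?_eq_getElem hl
      have hgd : xs.getD m 0 = xs[m] := by rw [List.getD_eq_getElem?_getD, hsome]; rfl
      by_cases hz : xs[m] = 0
      · rw [if_pos (by rw [hgd]; exact hz), List.getElem?_set, if_pos rfl, if_pos hl, hsome]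
        simp [hz]
      · rw [if_neg (by rw [hgd]; exact hz), hsome]
        simp [hz]
    · have hnone : xs[m]? = none := List.getElem?_eq_none (by omega)
      by_cases hz : xs.getD m 0 = 0
      · rw [if_pos hz, List.getElem?_set, if_pos rfl, if_neg hl, hnone]; rfl
      · rw [if_neg hz, hnone]; rfl
  · by_cases hz : xs.getD j.toNat 0 = 0
    · rw [if_pos hz, List.getElem?_set, if_neg (by omega : ¬ j.toNat = m), if_neg h]
    · rw [if_neg hz, if_neg h]

-- one outer step of A's sieve, at i = k
theorem stepA (n : Int) (N k : Nat) (hn : n = (N : Int)) (hk : 2 ≤ k) (hkN : k < N) :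
    (fun (st : List (List Int) × List Bool) (i : Int) =>
        if st.2.getD i.toNat false then
          (PySem.List.pyRange i n i).foldl
            (fun st2 j => (st2.1.modify j.toNat (· ++ [i]), st2.2.set j.toNat false)) st
        else st)
      ((List.range N).map (La k), (List.range N).map (Pb k)) ((k : Int))
    = ((List.range N).map (La (k+1)), (List.range N).map (Pb (k+1))) := by
  simp only
  have htn : ((k : Int)).toNat = k := by simp
  rw [htn, getD_map_range _ _ _ hkN]
  have hmem : ∀ (m : Nat), ((m : Int) ∈ PySem.List.pyRange (↑k) n (↑k)) ↔ (k ∣ m ∧ k ≤ m ∧ m < N) := by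
    intro m; rw [hn]; exact mem_pyRange_mul k N m (by omega)
  have hnonneg : ∀ j ∈ PySem.List.pyRange (↑k) n (↑k), 0 ≤ j := by
    intro j hj
    rw [hn, PySem.List.mem_pyRange_iff_of_pos (by exact_mod_cast (by omega : 0 < k))] at hj
    have := hj.1; omega
  have hnd : (PySem.List.pyRange (↑k) n (↑k)).Nodup := hn ▸ nodup_pyRange_mul k N (by omega)
  by_cases hp : k.Prime
  · rw [if_pos ((Pb_self k hk).mpr hp)]
    rw [foldl_pair (fun (l : List (List Int)) (j : Int) => l.modify j.toNat (· ++ [(k : Int)]))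
      (fun (p : List Bool) (j : Int) => p.set j.toNat false)]
    refine Prod.ext ?_ ?_
    · simp only
      apply List.ext_getElem?
      intro m
      rw [foldl_pointwise _ (fun _ v => v ++ [(k : Int)]) _ hnd
        (fun xs j hj m => hstep_modify (k : Int) xs j (hnonneg j hj) m)]
      rw [getElem?_map_range, getElem?_map_range]
      by_cases hmN : m < N
      · rw [if_pos hmN, if_pos hmN]
        by_cases hc : k ∣ m ∧ 1 ≤ m
        · have : (m : Int) ∈ PySem.List.pyRange (↑k) n (↑k) :=
            (hmem m).mpr ⟨hc.1, Nat.le_of_dvd hc.2 hc.1, hmN⟩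
          rw [if_pos this, La_succ k m hp, if_pos hc]; rfl
        · have : ¬ ((m : Int) ∈ PySem.List.pyRange (↑k) n (↑k)) := by
            rw [hmem m]
            rintro ⟨h1, h2, -⟩
            exact hc ⟨h1, by omega⟩
          rw [if_neg this, La_succ k m hp, if_neg hc]
      · rw [if_neg hmN, if_neg hmN]
        split_ifs <;> rfl
    · simp only
      apply List.ext_getElem?
      intro m
      rw [foldl_pointwise _ (fun _ _ => false) _ hnd
        (fun xs j hj m => hstep_set xs j (hnonneg j hj) m)]
      rw [getElem?_map_range, getElem?_map_range]
      by_cases hmN : m < N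
      · rw [if_pos hmN, if_pos hmN]
        by_cases hc : k ∣ m ∧ 1 ≤ m
        · have : (m : Int) ∈ PySem.List.pyRange (↑k) n (↑k) :=
            (hmem m).mpr ⟨hc.1, Nat.le_of_dvd hc.2 hc.1, hmN⟩
          rw [if_pos this, Pb_succ k m hk hp, if_pos hc]; rfl
        · have : ¬ ((m : Int) ∈ PySem.List.pyRange (↑k) n (↑k)) := by
            rw [hmem m]
            rintro ⟨h1, h2, -⟩
            exact hc ⟨h1, by omega⟩
          rw [if_neg this, Pb_succ k m hk hp, if_neg hc]
      · rw [if_neg hmN, if_neg hmN]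
        split_ifs <;> rfl
  · rw [if_neg (show ¬ (Pb k k = true) from fun h => hp ((Pb_self k hk).mp h))]
    refine Prod.ext ?_ ?_ <;> simp only
    · exact List.map_congr_left (fun m _ => (La_succ_not k m hp).symm)
    · exact List.map_congr_left (fun m _ => (Pb_succ_not k m hp).symm)

-- one outer step of B's spf sieve, at i = k
theorem stepB (n : Int) (N k : Nat) (hn : n = (N : Int)) (hk : 2 ≤ k) (hkN : k < N) :
    (fun (s : List Int) (i : Int) =>
        if s.getD i.toNat 0 = 0 then
          (PySem.List.pyRange i n i).foldl
            (fun s2 j => if s2.getD j.toNat 0 = 0 then s2.set j.toNat i else s2) s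
        else s)
      ((List.range N).map (spfVal k)) ((k : Int))
    = (List.range N).map (spfVal (k+1)) := by
  simp only
  have htn : ((k : Int)).toNat = k := by simp
  rw [htn, getD_map_range _ _ _ hkN]
  have hmem : ∀ (m : Nat), ((m : Int) ∈ PySem.List.pyRange (↑k) n (↑k)) ↔ (k ∣ m ∧ k ≤ m ∧ m < N) := by
    intro m; rw [hn]; exact mem_pyRange_mul k N m (by omega)
  have hnonneg : ∀ j ∈ PySem.List.pyRange (↑k) n (↑k), 0 ≤ j := by
    intro j hj
    rw [hn, PySem.List.mem_pyRange_iff_of_pos (by exact_mod_cast (by omega : 0 < k))] at hj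
    have := hj.1; omega
  have hnd : (PySem.List.pyRange (↑k) n (↑k)).Nodup := hn ▸ nodup_pyRange_mul k N (by omega)
  by_cases hp : k.Prime
  · rw [if_pos ((spfVal_self k hk).mpr hp)]
    apply List.ext_getElem?
    intro m
    rw [foldl_pointwise _ (fun _ w => if w = 0 then (k : Int) else w) _ hnd
      (fun xs j hj m => hstep_spf (k : Int) xs j (hnonneg j hj) m)]
    rw [getElem?_map_range, getElem?_map_range]
    by_cases hmN : m < N
    · rw [if_pos hmN, if_pos hmN]
      by_cases hc : k ∣ m ∧ k ≤ m
      · have hm2 : 2 ≤ m := le_trans hk hc.2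
        have hmne1 : m ≠ 1 := by omega
        have hmf2 : 2 ≤ m.minFac := (Nat.minFac_prime hmne1).two_le
        have hle : m.minFac ≤ k := Nat.minFac_le_of_dvd hk hc.1
        rw [if_pos ((hmem m).mpr ⟨hc.1, hc.2, hmN⟩)]
        simp only [Option.map_some]
        congr 1
        simp only [spfVal, if_neg (show ¬ m < 2 by omega)]
        by_cases hlt : m.minFac < k
        · rw [if_pos hlt,
            if_neg (show ¬ ((m.minFac : Int) = 0) by exact_mod_cast (by omega : ¬ m.minFac = 0)),
            if_pos (by omega : m.minFac < k + 1)]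
        · have heq : m.minFac = k := by omega
          rw [if_neg hlt, if_pos rfl, if_pos (by omega : m.minFac < k + 1), heq]
      · rw [if_neg (by rw [hmem m]; tauto)]
        congr 1
        by_cases hm2 : m < 2
        · simp [spfVal, hm2]
        · have hnd2 : ¬ k ∣ m := fun hd => hc ⟨hd, Nat.le_of_dvd (by omega) hd⟩
          have hne : m.minFac ≠ k := fun h => hnd2 (h ▸ Nat.minFac_dvd m)
          simp only [spfVal, if_neg hm2]
          by_cases hlt : m.minFac < k
          · rw [if_pos hlt, if_pos (by omega)]
          · rw [if_neg hlt, if_neg (by omega)]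
    · rw [if_neg hmN, if_neg hmN]
      split_ifs <;> rfl
  · rw [if_neg (fun h => hp ((spfVal_self k hk).mp h))]
    refine List.map_congr_left (fun m _ => ?_)
    by_cases hm2 : m < 2
    · simp [spfVal, hm2]
    · have hne : m.minFac ≠ k := fun h => hp (h ▸ Nat.minFac_prime (show m ≠ 1 by omega))
      simp only [spfVal, if_neg hm2]
      by_cases hlt : m.minFac < k
      · rw [if_pos hlt, if_pos (by omega)]
      · rw [if_neg hlt, if_neg (by omega)]

def canon (N : Nat) : List (List Int) :=
  (List.range N).map (fun m => (cpf m).map (fun q => (q : Int)))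

theorem initP (N : Nat) (hN : 2 ≤ N) :
    ((List.replicate N true).set 0 false).set 1 false = (List.range N).map (Pb 2) := by
  apply List.ext_getElem?
  intro m
  rw [List.getElem?_set, List.getElem?_set, getElem?_map_range]
  rcases m with - | mm
  · rw [if_neg (by omega), if_pos rfl, if_pos (by simpa using (by omega : 0 < N)),
      if_pos (by omega)]
    rw [Pb_two]; rfl
  · rcases mm with - | m2
    · rw [if_pos rfl, if_pos (by simpa using (by omega : 1 < N)), if_pos (by omega), Pb_two]; rfl
    · rw [if_neg (by omega), if_neg (by omega), List.getElem?_replicate]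
      by_cases h : m2 + 2 < N
      · rw [if_pos h, if_pos h, Pb_two, decide_eq_true (by omega : 2 ≤ m2 + 2)]
      · rw [if_neg h, if_neg h]

theorem initS (N : Nat) (hN : 2 ≤ N) :
    ((List.replicate N (0 : Int)).set 0 1).set 1 1 = (List.range N).map (spfVal 2) := by
  apply List.ext_getElem?
  intro m
  rw [List.getElem?_set, List.getElem?_set, getElem?_map_range]
  rcases m with - | mm
  · rw [if_neg (by omega), if_pos rfl, if_pos (by simpa using (by omega : 0 < N)),
      if_pos (by omega), spfVal_two, if_pos (by omega)]
  · rcases mm with - | m2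
    · rw [if_pos rfl, if_pos (by simpa using (by omega : 1 < N)), if_pos (by omega),
        spfVal_two, if_pos (by omega)]
    · rw [if_neg (by omega), if_neg (by omega), List.getElem?_replicate]
      by_cases h : m2 + 2 < N
      · rw [if_pos h, if_pos h, spfVal_two, if_neg (by omega)]
      · rw [if_neg h, if_neg h]

theorem initL (n : Int) (N : Nat) (hn : n = (N : Int)) :
    (PySem.List.pyRange 0 n 1).foldl (fun l _ => l ++ [([] : List Int)]) []
      = (List.range N).map (La 2) := by
  rw [foldl_append_singleton (fun _ => ([] : List Int))]
  apply List.ext_getElem?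
  intro m
  rw [getElem?_map_range, List.nil_append, List.getElem?_map]
  have hlen : (PySem.List.pyRange 0 n 1).length = N := by
    rw [hn, PySem.List.length_pyRange_one]; simp
  by_cases h : m < N
  · rw [if_pos h, List.getElem?_eq_getElem (by omega), La_two]; rfl
  · rw [if_neg h, List.getElem?_eq_none (by omega)]; rfl

theorem outerA (n : Int) (N : Nat) (hn : n = (N : Int)) :
    ∀ c, 2 + c ≤ N →
      (PySem.List.pyRange 2 (↑(2+c)) 1).foldl
        (fun (st : List (List Int) × List Bool) i =>
          if st.2.getD i.toNat false then
            (PySem.List.pyRange i n i).foldl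
              (fun st2 j => (st2.1.modify j.toNat (· ++ [i]), st2.2.set j.toNat false)) st
          else st)
        ((List.range N).map (La 2), (List.range N).map (Pb 2))
      = ((List.range N).map (La (2+c)), (List.range N).map (Pb (2+c))) := by
  intro c
  induction c with
  | zero => intro _; rw [PySem.List.pyRange_one_eq_nil (by norm_num)]; rfl
  | succ c ih =>
    intro hc
    have hcast : ((2 + (c+1) : Nat) : Int) = ((2 + c : Nat) : Int) + 1 := by push_cast; ring
    rw [hcast, PySem.List.pyRange_one_succ_right (by exact_mod_cast (by omega : 2 ≤ 2 + c)),
      List.foldl_append, ih (by omega)]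
    simpa using stepA n N (2+c) hn (by omega) (by omega)

theorem outerB (n : Int) (N : Nat) (hn : n = (N : Int)) :
    ∀ c, 2 + c ≤ N →
      (PySem.List.pyRange 2 (↑(2+c)) 1).foldl
        (fun (s : List Int) i =>
          if s.getD i.toNat 0 = 0 then
            (PySem.List.pyRange i n i).foldl
              (fun s2 j => if s2.getD j.toNat 0 = 0 then s2.set j.toNat i else s2) s
          else s)
        ((List.range N).map (spfVal 2))
      = (List.range N).map (spfVal (2+c)) := by
  intro c
  induction c with
  | zero => intro _; rw [PySem.List.pyRange_one_eq_nil (by norm_num)]; rfl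
  | succ c ih =>
    intro hc
    have hcast : ((2 + (c+1) : Nat) : Int) = ((2 + c : Nat) : Int) + 1 := by push_cast; ring
    rw [hcast, PySem.List.pyRange_one_succ_right (by exact_mod_cast (by omega : 2 ≤ 2 + c)),
      List.foldl_append, ih (by omega)]
    simpa using stepB n N (2+c) hn (by omega) (by omega)

theorem La_canon (N m : Nat) (hm : m < N) : La N m = (cpf m).map (fun q => (q : Int)) := by
  rcases Nat.eq_zero_or_pos m with rfl | hm1
  · rw [show cpf 0 = [] from rfl]
    simp [La]
  · have hfe : (List.range N).filter (fun q => Nat.Prime q ∧ q ∣ m ∧ 1 ≤ m)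
        = (List.range N).filter (fun q => Nat.Prime q ∧ q ∣ m) := by
      apply List.filter_congr
      intro q _
      refine decide_eq_decide.mpr ?_
      constructor
      · rintro ⟨h1, h2, -⟩; exact ⟨h1, h2⟩
      · rintro ⟨h1, h2⟩; exact ⟨h1, h2, hm1⟩
    have hcf : (List.range N).filter (fun q => Nat.Prime q ∧ q ∣ m) = cpf m := by
      refine sorted_eq_of_mem_iff
        (List.Pairwise.sublist (List.filter_sublist) List.pairwise_lt_range)
        (cpf_pairwise m) ?_
      intro q
      rw [mem_cpf m q hm1, List.mem_filter, List.mem_range]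
      constructor
      · rintro ⟨-, h⟩; exact (by simpa using h)
      · rintro ⟨h1, h2⟩
        exact ⟨by have := Nat.le_of_dvd hm1 h2; omega, by simp [h1, h2]⟩
    rw [La, hfe, hcf]

theorem era_eq_canon (n : Int) (hn : 2 ≤ n) : era n = canon n.toNat := by
  have hN : 2 ≤ n.toNat := by omega
  have hnn : n = ((n.toNat : Nat) : Int) := by omega
  simp only [era]
  rw [initL n n.toNat hnn, initP n.toNat hN]
  have hrange : PySem.List.pyRange 2 n 1 = PySem.List.pyRange 2 (↑(2 + (n.toNat - 2)) : Int) 1 := by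
    congr 1; omega
  rw [hrange, outerA n n.toNat hnn (n.toNat - 2) (by omega)]
  simp only
  apply List.map_congr_left
  intro m hm
  have : 2 + (n.toNat - 2) = n.toNat := by omega
  rw [this]
  exact La_canon n.toNat m (List.mem_range.mp hm)

theorem era_alt_eq_canon (n : Int) (hn : 2 ≤ n) : era_alt n = canon n.toNat := by
  have hN : 2 ≤ n.toNat := by omega
  have hnn : n = ((n.toNat : Nat) : Int) := by omega
  simp only [era_alt]
  rw [initS n.toNat hN]
  have hrange : PySem.List.pyRange 2 n 1 = PySem.List.pyRange 2 (↑(2 + (n.toNat - 2)) : Int) 1 := by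
    congr 1; omega
  rw [hrange, outerB n n.toNat hnn (n.toNat - 2) (by omega)]
  have : 2 + (n.toNat - 2) = n.toNat := by omega
  rw [this]
  rw [foldl_append_singleton (fun (m : Int) => pfLoop m.toNat ((List.range n.toNat).map (spfVal n.toNat)) m [])]
  rw [List.nil_append]
  have hzero : PySem.List.pyRange 0 n 1 = (List.range n.toNat).map (fun (k : Nat) => (k : Int)) := by
    rw [hnn]; exact PySem.List.pyRange_zero_natCast n.toNat
  rw [hzero, List.map_map, canon]
  apply List.map_congr_left
  intro m hm
  have hmN := List.mem_range.mp hm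
  have hspf : ∀ x : Nat, 2 ≤ x → x < n.toNat →
      ((List.range n.toNat).map (spfVal n.toNat)).getD x 0 = (x.minFac : Int) := by
    intro x hx2 hxN
    rw [getD_map_range _ _ _ hxN]
    have : x.minFac ≤ x := Nat.minFac_le (by omega)
    simp only [spfVal, if_neg (show ¬ x < 2 by omega), if_pos (by omega : x.minFac < n.toNat)]
  simp only [Function.comp]
  have htn : ((m : Int)).toNat = m := by simp
  rw [htn, pfLoop_spec n.toNat _ hspf m hmN m (le_refl m) [], List.nil_append]

-- ===== VERDICT (by name: the statement is the Claim_ definition above) =====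
theorem era_spec : Claim_equal_era := by
  intro n _ hpre
  unfold Spec_era
  rw [era_eq_canon n hpre, era_alt_eq_canon n hpre]
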